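-- pv_equiv track=rewrite | github.com/jearlbcache/fossilized-ark | scripts/mendelian_concordance.py | mendelian_check
-- ===== SOURCE A (Python) =====
-- def mendelian_check(father_snps, mother_snps, child_snps):
--     """Compute Mendelian violation rate on sites genotyped in all three."""
--     common = set(father_snps) & set(mother_snps) & set(child_snps)
--     violations = 0
--     for site in common:
--         c = child_snps[site]
--         f_alleles = set(father_snps[site])
--         m_alleles = set(mother_snps[site])
--         valid = any(
--             tuple(sorted([fa, ma])) == c
--             for fa in f_alleles for ma in m_alleles
--         )
--         if not valid:
--             violations += 1
--     return len(common), violations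
-- ===== SOURCE B (Python) =====
-- def mendelian_check(father_snps, mother_snps, child_snps):
--     """One pass over the child's sites with a closed-form Mendelian test:
--     no three-way set intersection, no enumeration of allele pairs."""
--     shared = 0
--     violations = 0
--     for site, (lo, hi) in child_snps.items():
--         if site in father_snps and site in mother_snps:
--             shared += 1
--             f = father_snps[site]
--             m = mother_snps[site]
--             if not (lo <= hi and ((lo in f and hi in m) or (hi in f and lo in m))):
--                 violations += 1
--     return shared, violations
-- ===== Notes on version B (the rewrite author's own statement) =====
-- stated objective: simpler
-- what changed: One pass over the child's items with dict-membership tests and a closed-form Mendelian condition (c[0]<=c[1] and the two cross-membership checks) replaces A's three-way set intersection followed by, per site, building two allele sets and enumerating and sorting every father x mother allele pair.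
import Mathlib
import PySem

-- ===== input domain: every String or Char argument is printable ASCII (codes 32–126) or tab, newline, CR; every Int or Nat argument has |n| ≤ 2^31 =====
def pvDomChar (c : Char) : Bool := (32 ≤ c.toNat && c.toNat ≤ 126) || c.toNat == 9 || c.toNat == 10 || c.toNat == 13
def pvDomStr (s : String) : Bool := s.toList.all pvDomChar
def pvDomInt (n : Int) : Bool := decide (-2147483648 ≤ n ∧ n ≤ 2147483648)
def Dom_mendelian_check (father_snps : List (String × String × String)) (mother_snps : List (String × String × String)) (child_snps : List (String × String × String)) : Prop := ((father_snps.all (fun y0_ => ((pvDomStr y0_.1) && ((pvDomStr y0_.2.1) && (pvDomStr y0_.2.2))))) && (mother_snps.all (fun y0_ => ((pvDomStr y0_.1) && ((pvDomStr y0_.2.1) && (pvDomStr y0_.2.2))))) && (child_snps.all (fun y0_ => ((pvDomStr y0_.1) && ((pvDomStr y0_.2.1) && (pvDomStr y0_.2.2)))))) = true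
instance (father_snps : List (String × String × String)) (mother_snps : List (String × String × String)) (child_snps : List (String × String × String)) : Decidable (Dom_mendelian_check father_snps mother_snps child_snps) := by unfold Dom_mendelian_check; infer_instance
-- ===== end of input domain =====

-- B replaces A's three-way set intersection and nested allele-pair enumeration by one
-- pass over the child's items with a closed-form Mendelian test (objective: simpler).


-- ===== PORT A =====
def mendelian_check (father_snps : List (String × String × String)) (mother_snps : List (String × String × String)) (child_snps : List (String × String × String)) : Int × Int :=
  let fd := PySem.Dict.mk father_snps
  let md := PySem.Dict.mk mother_snps
  let cd := PySem.Dict.mk child_snps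
  -- common = set(father_snps) & set(mother_snps) & set(child_snps)
  let common : PySem.Set String :=
    PySem.Set.inter (PySem.Set.inter (PySem.Set.ofList fd.keys) (PySem.Set.ofList md.keys))
      (PySem.Set.ofList cd.keys)
  -- for site in common: … (only counts are accumulated, so the set's order is immaterial)
  let violations : Int := common.foldl (fun violations site =>
    let c := cd.getD site ("", "")            -- site ∈ common ⊆ keys, so the default is never used
    let fv := fd.getD site ("", "")
    let mv := md.getD site ("", "")
    let f_alleles := PySem.Set.ofList [fv.1, fv.2]
    let m_alleles := PySem.Set.ofList [mv.1, mv.2]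
    let valid := f_alleles.any (fun fa => m_alleles.any (fun ma =>
      PySem.List.sorted [fa, ma] (fun x => x) false == [c.1, c.2]))
    if valid then violations else violations + 1) 0
  ((common.length : Int), violations)

-- ===== PORT B =====
def mendelian_check_alt (father_snps : List (String × String × String)) (mother_snps : List (String × String × String)) (child_snps : List (String × String × String)) : Int × Int :=
  let fd := PySem.Dict.mk father_snps
  let md := PySem.Dict.mk mother_snps
  child_snps.foldl (fun acc p =>
    if fd.contains p.1 && md.contains p.1 then
      let fv := fd.getD p.1 ("", "")
      let mv := md.getD p.1 ("", "")
      let lo := p.2.1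
      let hi := p.2.2
      let ok := decide (lo.toList ≤ hi.toList) &&
        (((lo == fv.1 || lo == fv.2) && (hi == mv.1 || hi == mv.2)) ||
         ((hi == fv.1 || hi == fv.2) && (lo == mv.1 || lo == mv.2)))
      (acc.1 + 1, if ok then acc.2 else acc.2 + 1)
    else acc) ((0 : Int), (0 : Int))

-- ===== PRECONDITION & SPEC =====
-- Pre_ excludes association lists with a duplicated site key: those do not arise from a
-- Python dict (duplicate keys collapse when the dict is built), so the list-level
-- first-match reading is not the dict A actually receives there.
def Pre_mendelian_check (father_snps : List (String × String × String)) (mother_snps : List (String × String × String)) (child_snps : List (String × String × String)) : Prop :=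
  (father_snps.map Prod.fst).Nodup ∧ (mother_snps.map Prod.fst).Nodup ∧ (child_snps.map Prod.fst).Nodup
instance (father_snps : List (String × String × String)) (mother_snps : List (String × String × String)) (child_snps : List (String × String × String)) : Decidable (Pre_mendelian_check father_snps mother_snps child_snps) := by unfold Pre_mendelian_check; infer_instance

def pvWitness_mendelian_check : (List (String × String × String)) × (List (String × String × String)) × (List (String × String × String)) :=
  ([("s1", "A", "C")], [("s1", "A", "A")], [("s1", "A", "A")])

def Spec_mendelian_check (father_snps : List (String × String × String)) (mother_snps : List (String × String × String)) (child_snps : List (String × String × String)) (out : Int × Int) : Prop := out = mendelian_check_alt father_snps mother_snps child_snps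
instance (father_snps : List (String × String × String)) (mother_snps : List (String × String × String)) (child_snps : List (String × String × String)) (out : Int × Int) : Decidable (Spec_mendelian_check father_snps mother_snps child_snps out) := by unfold Spec_mendelian_check; infer_instance

-- ===== CLAIM (what is proved, stated in full; the proofs are below) =====
def Claim_equal_mendelian_check : Prop := ∀ (father_snps : List (String × String × String)) (mother_snps : List (String × String × String)) (child_snps : List (String × String × String)), Dom_mendelian_check father_snps mother_snps child_snps → Pre_mendelian_check father_snps mother_snps child_snps → Spec_mendelian_check father_snps mother_snps child_snps (mendelian_check father_snps mother_snps child_snps)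

-- ===== LEMMAS AND PROOFS =====

theorem pv_sorted_pair (a b : String) :
    PySem.List.sorted [a, b] (fun x => x) false
      = if b.toList < a.toList then [b, a] else [a, b] := by
  simp [PySem.List.sorted, PySem.List.insertBy]

theorem pv_pair (fv mv cv : String × String) :
    ((PySem.Set.ofList [fv.1, fv.2]).any (fun fa => (PySem.Set.ofList [mv.1, mv.2]).any (fun ma =>
      PySem.List.sorted [fa, ma] (fun x => x) false == [cv.1, cv.2])))
    = (decide (cv.1.toList ≤ cv.2.toList) &&
        (((cv.1 == fv.1 || cv.1 == fv.2) && (cv.2 == mv.1 || cv.2 == mv.2)) ||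
         ((cv.2 == fv.1 || cv.2 == fv.2) && (cv.1 == mv.1 || cv.1 == mv.2)))) := by
  rw [Bool.eq_iff_iff]
  simp only [List.any_eq_true, PySem.Set.mem_ofList, List.mem_cons, List.not_mem_nil, or_false,
    Bool.and_eq_true, Bool.or_eq_true, beq_iff_eq, decide_eq_true_eq, pv_sorted_pair]
  constructor
  · rintro ⟨fa, hfa, ma, hma, h⟩
    split at h <;> rename_i hlt <;>
      simp only [List.cons.injEq, and_true] at h <;> obtain ⟨h1, h2⟩ := h
    · exact ⟨by rw [← h1, ← h2]; exact le_of_lt hlt, Or.inr ⟨by rw [← h2]; exact hfa, by rw [← h1]; exact hma⟩⟩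
    · exact ⟨by rw [← h1, ← h2]; exact not_lt.mp hlt, Or.inl ⟨by rw [← h1]; exact hfa, by rw [← h2]; exact hma⟩⟩
  · rintro ⟨hle, (⟨hf, hm⟩ | ⟨hf, hm⟩)⟩
    · refine ⟨cv.1, hf, cv.2, hm, ?_⟩
      rw [if_neg (not_lt.mpr hle)]
    · refine ⟨cv.2, hf, cv.1, hm, ?_⟩
      by_cases hlt : cv.1.toList < cv.2.toList
      · rw [if_pos hlt]
      · have : cv.1 = cv.2 := String.toList_inj.mp (le_antisymm hle (not_lt.mp hlt))
        rw [this, if_neg (lt_irrefl _)]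

theorem pv_foldl_viol (g : String → Bool) (l : List String) (acc : Int) :
    l.foldl (fun v s => if g s then v else v + 1) acc
      = acc + ((l.countP (fun s => ! g s) : Nat) : Int) := by
  induction l generalizing acc with
  | nil => simp
  | cons x xs ih =>
    simp only [List.foldl_cons, List.countP_cons, ih]
    by_cases h : g x <;> simp [h] <;> omega

theorem pv_foldl_pairCount {α : Type} (q r : α → Bool) (l : List α) (a b : Int) :
    l.foldl (fun acc p => if q p then (acc.1 + 1, if r p then acc.2 else acc.2 + 1) else acc) (a, b)
      = (a + ((l.countP q : Nat) : Int), b + ((l.countP (fun p => q p && ! r p) : Nat) : Int)) := by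
  induction l generalizing a b with
  | nil => simp
  | cons x xs ih =>
    simp only [List.foldl_cons, List.countP_cons]
    by_cases hq : q x
    · by_cases hr : r x <;> (simp [hq, hr, ih, Prod.ext_iff]; omega)
    · simp [hq, ih]

theorem pv_main (f m c : List (String × String × String))
    (hc : (c.map Prod.fst).Nodup) :
    mendelian_check f m c = mendelian_check_alt f m c := by
  simp only [mendelian_check, mendelian_check_alt]
  rw [pv_foldl_viol, pv_foldl_pairCount]
  set fd := PySem.Dict.mk f with hfd
  set md := PySem.Dict.mk m with hmd
  set cd := PySem.Dict.mk c with hcd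
  have hkeysf : fd.keys = f.map Prod.fst := by simp [hfd, PySem.Dict.keys]
  have hkeysm : md.keys = m.map Prod.fst := by simp [hmd, PySem.Dict.keys]
  have hkeysc : cd.keys = c.map Prod.fst := by simp [hcd, PySem.Dict.keys]
  set Q : String → Bool := fun s => fd.contains s && md.contains s with hQ
  have hperm : (PySem.Set.inter (PySem.Set.inter (PySem.Set.ofList fd.keys) (PySem.Set.ofList md.keys))
      (PySem.Set.ofList cd.keys)).Perm ((c.map Prod.fst).filter Q) := by
    rw [List.perm_ext_iff_of_nodup
      (PySem.Set.nodup_inter _ _ (PySem.Set.nodup_inter _ _ (PySem.Set.nodup_ofList _)))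
      (List.Nodup.filter _ hc)]
    intro s
    simp only [PySem.Set.mem_inter, PySem.Set.mem_ofList, List.mem_filter, hQ,
      Bool.and_eq_true, PySem.Dict.contains_iff_mem_keys, hkeysf, hkeysm, hkeysc]
    tauto
  rw [Prod.mk.injEq]
  refine ⟨?_, ?_⟩
  · rw [hperm.length_eq, ← List.countP_eq_length_filter, List.countP_map, zero_add]
    norm_cast
  · rw [hperm.countP_eq, List.countP_filter, List.countP_map]
    simp only [zero_add]
    norm_cast
    rw [List.countP_eq_length_filter, List.countP_eq_length_filter]
    congr 1
    apply List.filter_congr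
    intro p hp
    have hval : cd.getD p.1 ("", "") = p.2 :=
      PySem.Dict.getD_of_mem_items cd hp (by rw [hkeysc]; exact hc) ("", "")
    cases hQp : (fd.contains p.1 && md.contains p.1)
    · simp [Function.comp, hQ, hQp]
    · simp only [Function.comp, hQ, hval, hQp, Bool.and_true, Bool.true_and]
      rw [pv_pair (fd.getD p.1 ("", "")) (md.getD p.1 ("", "")) p.2]

-- ===== VERDICT (by name: the statement is the Claim_ definition above) =====
theorem mendelian_check_spec : Claim_equal_mendelian_check := by
  intro father_snps mother_snps child_snps _ hpre
  unfold Spec_mendelian_check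
  exact pv_main father_snps mother_snps child_snps hpre.2.2
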